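-- pv_equiv track=rewrite | github.com/nisc586/aoc2020 | day24/part2.py | get_relative_position
-- ===== SOURCE A (Python) =====
-- from collections import namedtuple
--
-- Position = namedtuple("Position", ["x", "y"])
--
-- def get_relative_position(directions):
--     relative_position = Position(0, 0)
--     for direction in directions:
--         if direction == "e":
--             relative_position = Position(relative_position.x+1, relative_position.y)
--         elif direction == "se":
--             relative_position = Position(relative_position.x+1, relative_position.y-1)
--         elif direction == "sw":
--             relative_position = Position(relative_position.x, relative_position.y-1)
--         elif direction == "w":
--             relative_position = Position(relative_position.x-1, relative_position.y)
--         elif direction == "nw":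
--             relative_position = Position(relative_position.x-1, relative_position.y+1)
--         elif direction == "ne":
--             relative_position = Position(relative_position.x, relative_position.y+1)
--     return relative_position
-- ===== SOURCE B (Python) =====
-- from collections import namedtuple, Counter
--
-- Position = namedtuple("Position", ["x", "y"])
--
-- def get_relative_position(directions):
--     c = Counter(directions)
--     x = c["e"] + c["se"] - c["w"] - c["nw"]
--     y = c["ne"] + c["nw"] - c["se"] - c["sw"]
--     return Position(x, y)
-- ===== Notes on version B (the rewrite author's own statement) =====
-- stated objective: simpler
-- what changed: Replaces the per-element if-elif fold over a running position with a count-all-directions pass (Counter) followed by one fixed 6-term arithmetic combination.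
import Mathlib
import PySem

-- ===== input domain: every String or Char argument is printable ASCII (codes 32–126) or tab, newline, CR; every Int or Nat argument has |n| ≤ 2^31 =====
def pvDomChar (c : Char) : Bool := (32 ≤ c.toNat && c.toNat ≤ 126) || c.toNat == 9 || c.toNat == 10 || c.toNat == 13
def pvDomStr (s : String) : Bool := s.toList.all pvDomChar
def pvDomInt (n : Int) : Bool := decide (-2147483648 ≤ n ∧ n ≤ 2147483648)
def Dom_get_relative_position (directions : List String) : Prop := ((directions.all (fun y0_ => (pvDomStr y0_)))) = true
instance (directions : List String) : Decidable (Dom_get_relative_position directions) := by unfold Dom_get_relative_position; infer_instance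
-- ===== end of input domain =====

-- B replaces A's per-element if-elif position updates with a count-then-combine: count the directions once (Counter), then one fixed arithmetic formula (simpler decomposition, same cost).


-- ===== PORT A =====
def get_relative_position (directions : List String) : Int × Int :=
  directions.foldl (fun relative_position direction =>
    if direction = "e" then (relative_position.1 + 1, relative_position.2)
    else if direction = "se" then (relative_position.1 + 1, relative_position.2 - 1)
    else if direction = "sw" then (relative_position.1, relative_position.2 - 1)
    else if direction = "w" then (relative_position.1 - 1, relative_position.2)
    else if direction = "nw" then (relative_position.1 - 1, relative_position.2 + 1)
    else if direction = "ne" then (relative_position.1, relative_position.2 + 1)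
    else relative_position) (0, 0)

-- ===== PORT B =====
def get_relative_position_alt (directions : List String) : Int × Int :=
  let c := PySem.Dict.counter directions
  let x := c.getD "e" 0 + c.getD "se" 0 - c.getD "w" 0 - c.getD "nw" 0
  let y := c.getD "ne" 0 + c.getD "nw" 0 - c.getD "se" 0 - c.getD "sw" 0
  (x, y)

-- ===== PRECONDITION & SPEC =====
def Spec_get_relative_position (directions : List String) (out : Int × Int) : Prop := out = get_relative_position_alt directions
instance (directions : List String) (out : Int × Int) : Decidable (Spec_get_relative_position directions out) := by unfold Spec_get_relative_position; infer_instance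

-- ===== CLAIM (what is proved, stated in full; the proofs are below) =====
def Claim_equal_get_relative_position : Prop := ∀ (directions : List String), Dom_get_relative_position directions → Spec_get_relative_position directions (get_relative_position directions)

-- ===== LEMMAS AND PROOFS =====

-- A's fold, started from any position p, lands at p plus the count-based offsets.
theorem foldA_eq_counts (directions : List String) (p : Int × Int) :
    (directions.foldl (fun relative_position direction =>
      if direction = "e" then (relative_position.1 + 1, relative_position.2)
      else if direction = "se" then (relative_position.1 + 1, relative_position.2 - 1)
      else if direction = "sw" then (relative_position.1, relative_position.2 - 1)
      else if direction = "w" then (relative_position.1 - 1, relative_position.2)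
      else if direction = "nw" then (relative_position.1 - 1, relative_position.2 + 1)
      else if direction = "ne" then (relative_position.1, relative_position.2 + 1)
      else relative_position) p)
    = (p.1 + directions.count "e" + directions.count "se"
         - directions.count "w" - directions.count "nw",
       p.2 + directions.count "ne" + directions.count "nw"
         - directions.count "se" - directions.count "sw") := by
  induction directions generalizing p with
  | nil => simp
  | cons h t ih =>
    simp only [List.foldl_cons, List.count_cons]
    rw [ih]
    clear ih
    split_ifs <;> simp_all <;> (try constructor) <;> ring

-- ===== VERDICT (by name: the statement is the Claim_ definition above) =====
theorem get_relative_position_spec : Claim_equal_get_relative_position := by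
  intro directions _
  unfold Spec_get_relative_position get_relative_position get_relative_position_alt
  rw [foldA_eq_counts directions (0, 0)]
  simp [PySem.Dict.getD_counter]
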